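-- pv_equiv track=rewrite | github.com/BayesianSociety/multi-agent-educational-software | orchestrator.py | changed_paths_from_snapshots
-- ===== SOURCE A (Python) =====
-- from typing import Dict, Iterable, List, Optional, Sequence, Set, Tuple
--
-- def changed_paths_from_snapshots(pre: Dict[str, object], post: Dict[str, object]) -> Tuple[List[str], List[str], List[str]]:
--     pre_h: Dict[str, str] = pre["hashes"]  # type: ignore[assignment]
--     post_h: Dict[str, str] = post["hashes"]  # type: ignore[assignment]
--
--     all_paths = sorted(set(pre_h.keys()) | set(post_h.keys()))
--     changed: List[str] = []
--     deleted: List[str] = []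
--     new: List[str] = []
--
--     for p in all_paths:
--         if p not in pre_h and p in post_h:
--             changed.append(p)
--             new.append(p)
--         elif p in pre_h and p not in post_h:
--             changed.append(p)
--             deleted.append(p)
--         elif p in pre_h and p in post_h and pre_h[p] != post_h[p]:
--             changed.append(p)
--
--     return changed, deleted, new
-- ===== SOURCE B (Python) =====
-- def changed_paths_from_snapshots(pre, post):
--     pre_h = pre["hashes"]
--     post_h = post["hashes"]
--     new_set = set(post_h) - set(pre_h)
--     deleted_set = set(pre_h) - set(post_h)
--     modified = {p for p in set(pre_h) & set(post_h) if pre_h[p] != post_h[p]}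
--     return sorted(new_set | deleted_set | modified), sorted(deleted_set), sorted(new_set)
-- ===== Notes on version B (the rewrite author's own statement) =====
-- stated objective: simpler
-- what changed: Replaces the single loop over the sorted key union with its if/elif classification chain by direct set algebra on the key sets (new = post-pre, deleted = pre-post, modified = differing intersection) followed by three independent sorts.
import Mathlib
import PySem

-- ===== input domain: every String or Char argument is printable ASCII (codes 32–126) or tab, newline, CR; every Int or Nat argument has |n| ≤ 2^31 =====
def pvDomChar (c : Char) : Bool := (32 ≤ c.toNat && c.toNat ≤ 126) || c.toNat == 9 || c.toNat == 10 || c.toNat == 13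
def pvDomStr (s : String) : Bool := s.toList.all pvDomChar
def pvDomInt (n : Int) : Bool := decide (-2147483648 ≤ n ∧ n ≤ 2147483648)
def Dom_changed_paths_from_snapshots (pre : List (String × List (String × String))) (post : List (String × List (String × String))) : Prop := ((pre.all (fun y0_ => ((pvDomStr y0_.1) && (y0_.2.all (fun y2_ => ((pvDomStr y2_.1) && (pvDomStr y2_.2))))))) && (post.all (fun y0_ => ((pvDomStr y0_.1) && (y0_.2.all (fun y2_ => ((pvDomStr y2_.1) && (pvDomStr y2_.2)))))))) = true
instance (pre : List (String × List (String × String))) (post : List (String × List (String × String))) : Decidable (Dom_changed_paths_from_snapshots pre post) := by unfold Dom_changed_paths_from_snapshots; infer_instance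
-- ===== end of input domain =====

-- B replaces A's single if/elif loop over the sorted key union by set algebra
-- (new/deleted/modified key sets) followed by three independent sorts: simpler decomposition, same cost.


-- ===== PORT A =====
def changed_paths_from_snapshots (pre : List (String × List (String × String))) (post : List (String × List (String × String))) : List String × List String × List String :=
  match (PySem.Dict.ofList pre).get? "hashes", (PySem.Dict.ofList post).get? "hashes" with
  | some preL, some postL =>
    let pre_h := PySem.Dict.ofList preL
    let post_h := PySem.Dict.ofList postL
    let all_paths := PySem.List.sorted
      (PySem.Set.union (PySem.Set.ofList pre_h.keys) (PySem.Set.ofList post_h.keys)) (fun x => x)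
    all_paths.foldl (fun acc p =>
      if !(pre_h.contains p) && post_h.contains p then
        (acc.1 ++ [p], acc.2.1, acc.2.2 ++ [p])
      else if pre_h.contains p && !(post_h.contains p) then
        (acc.1 ++ [p], acc.2.1 ++ [p], acc.2.2)
      else if pre_h.contains p && post_h.contains p && (pre_h.get? p != post_h.get? p) then
        (acc.1 ++ [p], acc.2.1, acc.2.2)
      else acc) ([], [], [])
  | _, _ => ([], [], [])   -- Python raises KeyError here; excluded by Pre_

-- ===== PORT B =====
def changed_paths_from_snapshots_alt (pre : List (String × List (String × String))) (post : List (String × List (String × String))) : List String × List String × List String :=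
  match (PySem.Dict.ofList pre).get? "hashes" with
  | none => ([], [], [])   -- Python raises KeyError here; excluded by Pre_
  | some preL =>
  match (PySem.Dict.ofList post).get? "hashes" with
  | none => ([], [], [])   -- Python raises KeyError here; excluded by Pre_
  | some postL =>
    let pre_h := PySem.Dict.ofList preL
    let post_h := PySem.Dict.ofList postL
    let new_set := PySem.Set.diff (PySem.Set.ofList post_h.keys) (PySem.Set.ofList pre_h.keys)
    let deleted_set := PySem.Set.diff (PySem.Set.ofList pre_h.keys) (PySem.Set.ofList post_h.keys)
    let modified := (PySem.Set.inter (PySem.Set.ofList pre_h.keys) (PySem.Set.ofList post_h.keys)).filter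
      (fun p => pre_h.get? p != post_h.get? p)
    ( PySem.List.sorted (PySem.Set.union (PySem.Set.union new_set deleted_set) modified) (fun x => x),
      PySem.List.sorted deleted_set (fun x => x),
      PySem.List.sorted new_set (fun x => x) )

-- ===== PRECONDITION & SPEC =====
-- Python raises KeyError unless both snapshots carry the "hashes" key; both A and B raise there.
def Pre_changed_paths_from_snapshots (pre : List (String × List (String × String))) (post : List (String × List (String × String))) : Prop :=
  (PySem.Dict.ofList pre).contains "hashes" = true ∧ (PySem.Dict.ofList post).contains "hashes" = true
instance (pre : List (String × List (String × String))) (post : List (String × List (String × String))) : Decidable (Pre_changed_paths_from_snapshots pre post) := by unfold Pre_changed_paths_from_snapshots; infer_instance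
def pvWitness_changed_paths_from_snapshots : (List (String × List (String × String))) × (List (String × List (String × String))) :=
  ([("hashes", [("a", "1"), ("b", "2")])], [("hashes", [("a", "3"), ("c", "2")])])

def Spec_changed_paths_from_snapshots (pre : List (String × List (String × String))) (post : List (String × List (String × String))) (out : List String × List String × List String) : Prop := out = changed_paths_from_snapshots_alt pre post
instance (pre : List (String × List (String × String))) (post : List (String × List (String × String))) (out : List String × List String × List String) : Decidable (Spec_changed_paths_from_snapshots pre post out) := by unfold Spec_changed_paths_from_snapshots; infer_instance

-- ===== CLAIM (what is proved, stated in full; the proofs are below) =====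
def Claim_equal_changed_paths_from_snapshots : Prop := ∀ (pre : List (String × List (String × String))) (post : List (String × List (String × String))), Dom_changed_paths_from_snapshots pre post → Pre_changed_paths_from_snapshots pre post → Spec_changed_paths_from_snapshots pre post (changed_paths_from_snapshots pre post)

-- ===== LEMMAS AND PROOFS =====

-- A's loop, from any starting accumulators, appends the filters of the three branch conditions.
theorem pv_loopA (d1 d2 : PySem.Dict String String) (l : List String) (c d n : List String) :
    l.foldl (fun acc p =>
      if !(d1.contains p) && d2.contains p then
        (acc.1 ++ [p], acc.2.1, acc.2.2 ++ [p])
      else if d1.contains p && !(d2.contains p) then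
        (acc.1 ++ [p], acc.2.1 ++ [p], acc.2.2)
      else if d1.contains p && d2.contains p && (d1.get? p != d2.get? p) then
        (acc.1 ++ [p], acc.2.1, acc.2.2)
      else acc) (c, d, n)
    = (c ++ l.filter (fun p => (!(d1.contains p) && d2.contains p)
          || (d1.contains p && !(d2.contains p))
          || (d1.contains p && d2.contains p && (d1.get? p != d2.get? p))),
       d ++ l.filter (fun p => d1.contains p && !(d2.contains p)),
       n ++ l.filter (fun p => !(d1.contains p) && d2.contains p)) := by
  induction l generalizing c d n with
  | nil => simp
  | cons p t ih =>
    by_cases hE : d1.get? p = d2.get? p <;>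
      cases hA : d1.contains p <;> cases hB : d2.contains p <;>
        (try simp [bne_iff_ne] at ih) <;> simp [hA, hB, hE, bne_iff_ne, ih]

-- strictly increasing from weakly increasing + no duplicates
theorem pv_pairwise_lt_of_le_nodup (l : List String) (hle : l.Pairwise (fun a b => a ≤ b))
    (hnd : l.Nodup) : l.Pairwise (fun a b => a < b) :=
  (hle.and hnd).imp (fun h => lt_of_le_of_ne h.1 h.2)

-- sorting a nodup list B equals filtering the strictly sorted list S by C when memberships agree
theorem pv_sorted_eq_filter (S : List String) (B : List String) (C : String → Bool)
    (hS : S.Pairwise (fun a b => a < b)) (hB : B.Nodup)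
    (hmem : ∀ a, a ∈ B ↔ (a ∈ S ∧ C a = true)) :
    PySem.List.sorted B (fun x => x) = S.filter C := by
  apply PySem.List.sorted_eq_of_perm_of_pairwise_lt
  · rw [List.perm_ext_iff_of_nodup ((hS.imp (fun h => ne_of_lt h)).filter C) hB]
    intro a
    rw [List.mem_filter, hmem]
  · exact hS.filter C

theorem changed_paths_from_snapshots_eq (pre post : List (String × List (String × String)))
    (h : Pre_changed_paths_from_snapshots pre post) :
    changed_paths_from_snapshots pre post = changed_paths_from_snapshots_alt pre post := by
  obtain ⟨h1, h2⟩ := h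
  rw [PySem.Dict.contains_eq_isSome_get?] at h1 h2
  cases hg1 : (PySem.Dict.ofList pre).get? "hashes" with
  | none => rw [hg1] at h1; simp at h1
  | some preL =>
    cases hg2 : (PySem.Dict.ofList post).get? "hashes" with
    | none => rw [hg2] at h2; simp at h2
    | some postL =>
      set d1 := PySem.Dict.ofList preL with hd1
      set d2 := PySem.Dict.ofList postL with hd2
      have hk1 : d1.keys.Nodup := by rw [hd1]; exact PySem.Dict.nodup_keys_ofList preL
      have hk2 : d2.keys.Nodup := by rw [hd2]; exact PySem.Dict.nodup_keys_ofList postL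
      simp only [changed_paths_from_snapshots, changed_paths_from_snapshots_alt, hg1, hg2, ← hd1, ← hd2]
      rw [pv_loopA]
      -- the big sorted union list S and its strict sortedness
      have hS : (PySem.List.sorted (PySem.Set.union (PySem.Set.ofList d1.keys) (PySem.Set.ofList d2.keys)) (fun x => x)).Pairwise (fun a b => a < b) := by
        apply pv_pairwise_lt_of_le_nodup
        · exact PySem.List.sorted_pairwise _ _
        · exact ((PySem.List.sorted_perm _ _ _).nodup_iff).mpr
            (PySem.Set.nodup_union _ _ (PySem.Set.nodup_ofList _))
      have hmemS : ∀ a, a ∈ (PySem.List.sorted (PySem.Set.union (PySem.Set.ofList d1.keys) (PySem.Set.ofList d2.keys)) (fun x => x)) ↔ (a ∈ d1.keys ∨ a ∈ d2.keys) := by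
        intro a
        rw [(PySem.List.sorted_perm _ _ _).mem_iff, PySem.Set.mem_union,
          PySem.Set.mem_ofList, PySem.Set.mem_ofList]
      refine Prod.ext ?_ (Prod.ext ?_ ?_)
      · -- changed
        simp only [List.nil_append]
        refine (pv_sorted_eq_filter _ _ _ hS ?_ ?_).symm
        · refine PySem.Set.nodup_union _ _ (PySem.Set.nodup_union _ _ ?_)
          exact PySem.Set.nodup_diff _ _ (PySem.Set.nodup_ofList _)
        · intro a
          cases hA : d1.contains a <;> cases hB : d2.contains a <;>
            simp [PySem.Set.mem_union, PySem.Set.mem_diff, PySem.Set.mem_inter,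
              PySem.Set.mem_ofList, List.mem_filter, hmemS a,
              ← PySem.Dict.contains_iff_mem_keys, hA, hB, bne_iff_ne]
      · -- deleted
        simp only [List.nil_append]
        refine (pv_sorted_eq_filter _ _ _ hS ?_ ?_).symm
        · exact PySem.Set.nodup_diff _ _ (PySem.Set.nodup_ofList _)
        · intro a
          cases hA : d1.contains a <;> cases hB : d2.contains a <;>
            simp [PySem.Set.mem_diff, PySem.Set.mem_ofList, hmemS a,
              ← PySem.Dict.contains_iff_mem_keys, hA, hB]
      · -- new
        simp only [List.nil_append]
        refine (pv_sorted_eq_filter _ _ _ hS ?_ ?_).symm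
        · exact PySem.Set.nodup_diff _ _ (PySem.Set.nodup_ofList _)
        · intro a
          cases hA : d1.contains a <;> cases hB : d2.contains a <;>
            simp [PySem.Set.mem_diff, PySem.Set.mem_ofList, hmemS a,
              ← PySem.Dict.contains_iff_mem_keys, hA, hB]

-- ===== VERDICT (by name: the statement is the Claim_ definition above) =====
theorem changed_paths_from_snapshots_spec : Claim_equal_changed_paths_from_snapshots := by
  intro pre post _ hpre
  exact changed_paths_from_snapshots_eq pre post hpre
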